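-- pv_equiv track=rewrite | github.com/laurap21/Proyecto_Katas_Python | ProyectoKatas.py | enmascarar_cadena
-- ===== SOURCE A (Python) =====
-- def enmascarar_cadena(variable):
--     """ La función convierte la variable en cadena de texto (str) y oculta todos los caracteres con # salvo los 4 úlimos.
--         ARGUMENTOS:
--         - variable (any) --> variable que convertiremos a string.
--         RETURN:
--         - resultado (string) --> cadena de caracteres con los primeros enmascarados. """
--
--     variable_str = str(variable)
--
--     resultado = ''
--
--     for indice in range(len(variable_str)):
--         if indice < (len(variable_str)-4):
--             resultado = resultado + '#'
--         else:
--             resultado = resultado + variable_str[indice]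
--
--     return resultado
-- ===== SOURCE B (Python) =====
-- def enmascarar_cadena(variable):
--     variable_str = str(variable)
--     return '#' * (len(variable_str) - 4) + variable_str[-4:]
-- ===== Notes on version B (the rewrite author's own statement) =====
-- stated objective: faster
-- what changed: Replaces the per-character loop with repeated string concatenation by a direct closed form: a mask string built by repetition plus the last-four-character slice.
import Mathlib
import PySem

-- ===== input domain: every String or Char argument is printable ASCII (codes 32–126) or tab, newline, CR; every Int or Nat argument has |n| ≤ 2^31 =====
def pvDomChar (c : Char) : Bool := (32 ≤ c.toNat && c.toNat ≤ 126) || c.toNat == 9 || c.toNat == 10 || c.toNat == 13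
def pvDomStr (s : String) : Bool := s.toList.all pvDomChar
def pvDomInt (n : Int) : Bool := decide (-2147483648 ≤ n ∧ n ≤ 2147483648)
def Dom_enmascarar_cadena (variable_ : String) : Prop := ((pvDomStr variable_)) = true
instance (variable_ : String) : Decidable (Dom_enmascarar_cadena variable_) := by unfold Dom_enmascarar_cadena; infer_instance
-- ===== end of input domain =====

-- B replaces A's character-by-character masking loop by a closed form (mask by repetition plus the last-four slice); a timing run measured B faster.

-- ===== PORT A =====
-- loop over range(len(s)); each index appends '#' or the character s[indice] (always in range)
def enmascarar_cadena (variable_ : String) : String :=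
  let cs := variable_.toList
  let n : Int := (cs.length : Int)
  String.ofList ((PySem.List.pyRange 0 n 1).foldl
    (fun res i => if i < n - 4 then res ++ ['#'] else res ++ [PySem.List.pyGetD cs i '?']) [])

-- ===== PORT B =====
def enmascarar_cadena_alt (variable_ : String) : String :=
  let cs := variable_.toList
  String.ofList (PySem.List.pyRepeat ['#'] ((cs.length : Int) - 4) ++ PySem.List.slice cs (some (-4)) none)

-- ===== PRECONDITION & SPEC =====
def Spec_enmascarar_cadena (variable_ : String) (out : String) : Prop := out = enmascarar_cadena_alt variable_
instance (variable_ : String) (out : String) : Decidable (Spec_enmascarar_cadena variable_ out) := by unfold Spec_enmascarar_cadena; infer_instance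

-- ===== CLAIM (what is proved, stated in full; the proofs are below) =====
def Claim_equal_enmascarar_cadena : Prop := ∀ (variable_ : String), Dom_enmascarar_cadena variable_ → Spec_enmascarar_cadena variable_ (enmascarar_cadena variable_)

-- ===== LEMMAS AND PROOFS =====

theorem pv_flatMap_const (l : List Int) :
    l.flatMap (fun _ => (['#'] : List Char)) = List.replicate l.length '#' := by
  induction l with
  | nil => rfl
  | cons x t ih => simp [List.flatMap_cons, ih, List.replicate_succ]

theorem pv_flatMap_single {α β : Type} (g : α → β) (l : List α) :
    l.flatMap (fun i => [g i]) = l.map g := by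
  induction l with
  | nil => rfl
  | cons x t ih => simp [List.flatMap_cons, ih]

theorem pv_main (cs : List Char) :
    (PySem.List.pyRange 0 (cs.length : Int) 1).foldl
      (fun res i => if i < (cs.length : Int) - 4 then res ++ ['#'] else res ++ [PySem.List.pyGetD cs i '?']) []
    = List.replicate (cs.length - 4) '#' ++ cs.drop (cs.length - 4) := by
  have hshape : ∀ (l : List Int) (acc : List Char),
      l.foldl (fun res i => if i < (cs.length : Int) - 4 then res ++ ['#'] else res ++ [PySem.List.pyGetD cs i '?']) acc
      = acc ++ l.flatMap (fun i => if i < (cs.length : Int) - 4 then ['#'] else [PySem.List.pyGetD cs i '?']) := by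
    intro l
    induction l with
    | nil => simp
    | cons x t ih =>
      intro acc
      by_cases h : x < (cs.length : Int) - 4 <;> simp [h, ih, List.append_assoc]
  have hsplit : PySem.List.pyRange 0 (cs.length : Int) 1
      = PySem.List.pyRange 0 ((cs.length - 4 : Nat) : Int) 1
        ++ PySem.List.pyRange ((cs.length - 4 : Nat) : Int) (cs.length : Int) 1 := by
    exact PySem.List.pyRange_one_append _ _ _ (by positivity) (by exact_mod_cast Nat.sub_le _ _)
  have h1 : ∀ i ∈ PySem.List.pyRange 0 ((cs.length - 4 : Nat) : Int) 1,
      (if i < (cs.length : Int) - 4 then (['#'] : List Char) else [PySem.List.pyGetD cs i '?']) = ['#'] := by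
    intro i hi
    rw [PySem.List.mem_pyRange_one] at hi
    have : i < (cs.length : Int) - 4 := by have := hi.2; omega
    simp [this]
  have h2 : ∀ i ∈ PySem.List.pyRange ((cs.length - 4 : Nat) : Int) (cs.length : Int) 1,
      (if i < (cs.length : Int) - 4 then (['#'] : List Char) else [PySem.List.pyGetD cs i '?'])
      = [PySem.List.pyGetD cs i '?'] := by
    intro i hi
    rw [PySem.List.mem_pyRange_one] at hi
    have : ¬ i < (cs.length : Int) - 4 := by have := hi.1; omega
    simp [this]
  rw [hshape, hsplit, List.flatMap_append, List.flatMap_congr h1, List.flatMap_congr h2,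
    pv_flatMap_const, pv_flatMap_single, PySem.List.length_pyRange_one]
  have hmap := PySem.List.map_pyGetD_pyRange cs '?' (a := ((cs.length - 4 : Nat) : Int)) (by positivity)
  rw [PySem.List.len_eq] at hmap
  rw [hmap]
  simp

-- ===== VERDICT (by name: the statement is the Claim_ definition above) =====
theorem enmascarar_cadena_spec : Claim_equal_enmascarar_cadena := by
  intro v _
  unfold Spec_enmascarar_cadena enmascarar_cadena enmascarar_cadena_alt
  simp only []
  rw [pv_main]
  congr 1
  rw [PySem.List.pyRepeat_singleton]
  have h4 : (-4 : Int) = -((4 : Nat) : Int) := by norm_num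
  rw [h4, PySem.List.slice_from_neg_natCast _ _ (by norm_num)]
  congr 1
  · congr 1; omega
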